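-- pv_equiv track=rewrite | github.com/soyoon26/Programmers | retake/Lv.2/Lv.2 138476.귤 고르기.py | solution
-- ===== SOURCE A (Python) =====
-- def solution(K, tangerine):
--     dict_tan = dict()
--
--     for i in tangerine:
--         if i in dict_tan:
--             dict_tan[i] += 1
--         else:
--             dict_tan[i] = 1
--     tan = []
--     for v in dict_tan.values():
--         tan.append(v)
--     tan.sort(reverse=True)
--
--     sum_t = 0
--     for t in range(len(tan)):
--         sum_t += tan[t]
--         if sum_t >= K:
--             ans = t + 1
--             break
--     return ans
-- ===== SOURCE B (Python) =====
-- def solution(K, tangerine):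
--     freq = {}
--     for i in tangerine:
--         freq[i] = freq.get(i, 0) + 1
--     # counting sort: histogram of frequencies instead of sort(reverse=True)
--     hist = {}
--     maxf = 0
--     for v in freq.values():
--         hist[v] = hist.get(v, 0) + 1
--         if v > maxf:
--             maxf = v
--     total = 0
--     types = 0
--     for f in range(maxf, 0, -1):
--         for _ in range(hist.get(f, 0)):
--             total += f
--             types += 1
--             if total >= K:
--                 return types
--     return types
-- ===== Notes on version B (the rewrite author's own statement) =====
-- stated objective: alternative
-- what changed: Replaces the comparison sort of the frequency list by a counting sort: a histogram of frequencies is built in one pass and walked from the largest frequency down, so no sort is performed.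
import Mathlib
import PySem

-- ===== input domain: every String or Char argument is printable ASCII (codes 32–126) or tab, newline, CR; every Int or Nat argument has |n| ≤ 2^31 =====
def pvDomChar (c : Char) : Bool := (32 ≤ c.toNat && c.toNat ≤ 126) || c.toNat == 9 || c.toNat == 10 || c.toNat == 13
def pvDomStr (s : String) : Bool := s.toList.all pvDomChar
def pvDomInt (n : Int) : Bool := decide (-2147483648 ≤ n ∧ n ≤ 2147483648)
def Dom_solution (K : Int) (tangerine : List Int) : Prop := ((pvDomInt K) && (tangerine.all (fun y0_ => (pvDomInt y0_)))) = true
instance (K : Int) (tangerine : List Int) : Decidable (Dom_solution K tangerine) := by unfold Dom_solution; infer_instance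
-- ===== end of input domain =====

-- B replaces A's reverse comparison sort of the frequency list by a counting sort
-- (a histogram of frequencies walked from the largest frequency down); same greedy result.

-- ===== PORT A =====
/-- A's final for-loop with break: walks the (sorted) list accumulating `sum_t` and index `t`;
    `none` = the loop finishes without binding `ans` (Python then raises UnboundLocalError). -/
def solutionFind (K : Int) : List Int → Int → Int → Option Int
  | [], _, _ => none
  | v :: rest, sum_t, t =>
    if sum_t + v ≥ K then some (t + 1) else solutionFind K rest (sum_t + v) (t + 1)

def solution (K : Int) (tangerine : List Int) : Int :=
  let dict_tan := tangerine.foldl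
    (fun d i => if d.contains i then d.insert i (d.getD i 0 + 1) else d.insert i 1)
    PySem.Dict.empty
  let tan := dict_tan.values.foldl (fun acc v => acc ++ [v]) []
  let tanS := PySem.List.sorted tan (fun x => x) true
  (solutionFind K tanS 0 0).getD 0  -- the `none` branch is A's UnboundLocalError, excluded by Pre_

-- ===== PORT B =====
/-- B's inner loop `for _ in range(n)`: `.inl ans` = early `return types`, `.inr` = loop done. -/
def solutionAltInner (K f : Int) : Nat → Int → Int → Int ⊕ (Int × Int)
  | 0, total, types => .inr (total, types)
  | n + 1, total, types =>
    if total + f ≥ K then .inl (types + 1)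
    else solutionAltInner K f n (total + f) (types + 1)

/-- B's outer loop `for f in range(maxf, 0, -1)` as recursion on the current `f`. -/
def solutionAltOuter (K : Int) (hist : PySem.Dict Int Int) : Nat → Int → Int → Int
  | 0, _, types => types
  | f + 1, total, types =>
    match solutionAltInner K ((f : Int) + 1) ((hist.getD ((f : Int) + 1) 0).toNat) total types with
    | .inl ans => ans
    | .inr (total', types') => solutionAltOuter K hist f total' types'

def solution_alt (K : Int) (tangerine : List Int) : Int :=
  let freq := tangerine.foldl (fun d i => d.insert i (d.getD i 0 + 1)) PySem.Dict.empty
  let hm := freq.values.foldl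
    (fun (p : PySem.Dict Int Int × Int) v =>
      (p.1.insert v (p.1.getD v 0 + 1), if v > p.2 then v else p.2))
    (PySem.Dict.empty, 0)
  solutionAltOuter K hm.1 hm.2.toNat 0 0

-- ===== PRECONDITION & SPEC =====
-- Pre_ excludes exactly the inputs on which A raises UnboundLocalError (the greedy sum never
-- reaches K): the empty list, and K > len(tangerine).
def Pre_solution (K : Int) (tangerine : List Int) : Prop :=
  tangerine ≠ [] ∧ K ≤ (tangerine.length : Int)
instance (K : Int) (tangerine : List Int) : Decidable (Pre_solution K tangerine) := by
  unfold Pre_solution; infer_instance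
def pvWitness_solution : Int × List Int := (2, [1, 1, 2])

def Spec_solution (K : Int) (tangerine : List Int) (out : Int) : Prop := out = solution_alt K tangerine
instance (K : Int) (tangerine : List Int) (out : Int) : Decidable (Spec_solution K tangerine out) := by
  unfold Spec_solution; infer_instance

-- ===== CLAIM (what is proved, stated in full; the proofs are below) =====
def Claim_equal_solution : Prop := ∀ (K : Int) (tangerine : List Int), Dom_solution K tangerine → Pre_solution K tangerine → Spec_solution K tangerine (solution K tangerine)

-- ===== LEMMAS AND PROOFS =====

/-- The descending counting-sort list: blocks `replicate (V.count f) f` for `f = n, …, 1`. -/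
def descBlocks (V : List Int) : Nat → List Int
  | 0 => []
  | n + 1 => List.replicate (V.count ((n : Int) + 1)) ((n : Int) + 1) ++ descBlocks V n

theorem descBlocks_count (V : List Int) (n : Nat) (w : Int) :
    (descBlocks V n).count w = if 1 ≤ w ∧ w ≤ (n : Int) then V.count w else 0 := by
  induction n with
  | zero =>
    simp only [descBlocks, List.count_nil]
    rw [if_neg (by omega)]
  | succ n ih =>
    rw [descBlocks, List.count_append, List.count_replicate, ih]
    by_cases hw : w = (n : Int) + 1
    · subst hw
      rw [if_pos (by simp), if_neg (by omega), if_pos (by push_cast; omega)]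
      omega
    · rw [if_neg (by simp only [beq_iff_eq]; omega)]
      have hiff : (1 ≤ w ∧ w ≤ (n : Int)) ↔ (1 ≤ w ∧ w ≤ ((n + 1 : Nat) : Int)) := by
        push_cast; omega
      rw [if_congr hiff rfl rfl]
      omega

theorem descBlocks_mem (V : List Int) (n : Nat) (x : Int) (hx : x ∈ descBlocks V n) :
    1 ≤ x ∧ x ≤ (n : Int) := by
  induction n with
  | zero => simp [descBlocks] at hx
  | succ n ih =>
    rw [descBlocks] at hx
    rcases List.mem_append.1 hx with h | h
    · rcases List.eq_of_mem_replicate h with rfl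
      constructor <;> push_cast <;> omega
    · have := ih h
      constructor <;> push_cast <;> push_cast at this <;> omega

theorem descBlocks_pairwise (V : List Int) (n : Nat) :
    (descBlocks V n).Pairwise (fun a b => b ≤ a) := by
  induction n with
  | zero => simp [descBlocks]
  | succ n ih =>
    rw [descBlocks]
    rw [List.pairwise_append]
    refine ⟨List.pairwise_replicate.2 (Or.inr le_rfl), ih, ?_⟩
    intro x hx y hy
    rcases List.eq_of_mem_replicate hx with rfl
    have := (descBlocks_mem V n y hy).2
    omega

theorem descBlocks_perm (V : List Int) (n : Nat)
    (h : ∀ v ∈ V, 1 ≤ v ∧ v ≤ (n : Int)) : (descBlocks V n).Perm V := by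
  rw [List.perm_iff_count]
  intro w
  rw [descBlocks_count]
  split_ifs with hw
  · rfl
  · symm
    rw [List.count_eq_zero]
    intro hmem
    exact hw (h w hmem)

theorem descBlocks_eq_sorted (V : List Int) (n : Nat)
    (h : ∀ v ∈ V, 1 ≤ v ∧ v ≤ (n : Int)) :
    PySem.List.sorted V (fun x => x) true = descBlocks V n := by
  haveI : Std.Antisymm (fun a b : Int => b ≤ a) := ⟨fun _ _ h1 h2 => le_antisymm h2 h1⟩
  have hp1 : (PySem.List.sorted V (fun x => x) true).Pairwise (fun a b : Int => b ≤ a) :=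
    PySem.List.sorted_pairwise_rev V (fun x => x)
  have hp2 := descBlocks_pairwise V n
  have hperm : (PySem.List.sorted V (fun x => x) true).Perm (descBlocks V n) :=
    (PySem.List.sorted_perm V (fun x => x) true).trans (descBlocks_perm V n h).symm
  exact List.Perm.eq_of_pairwise' hp1 hp2 hperm

theorem altInner_inr (K f : Int) (n : Nat) (total types total' types' : Int)
    (h : solutionAltInner K f n total types = .inr (total', types')) :
    types' = types + n := by
  induction n generalizing total types with
  | zero =>
    simp only [solutionAltInner] at h
    cases h
    simp
  | succ n ih =>
    rw [solutionAltInner] at h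
    split at h
    · cases h
    · have := ih _ _ h
      push_cast
      push_cast at this
      omega

theorem altInner_find (K f : Int) (n : Nat) (total types : Int) (rest : List Int) :
    solutionFind K (List.replicate n f ++ rest) total types =
      match solutionAltInner K f n total types with
      | .inl a => some a
      | .inr (t, c) => solutionFind K rest t c := by
  induction n generalizing total types with
  | zero => simp [solutionAltInner]
  | succ n ih =>
    rw [List.replicate_succ, List.cons_append, solutionFind, solutionAltInner]
    split_ifs with h
    · rfl
    · exact ih _ _

theorem altOuter_find (K : Int) (V : List Int) (n : Nat) (total types : Int) :
    solutionAltOuter K (PySem.Dict.counter V) n total types =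
      match solutionFind K (descBlocks V n) total types with
      | some a => a
      | none => types + ((descBlocks V n).length : Int) := by
  induction n generalizing total types with
  | zero => simp [solutionAltOuter, descBlocks, solutionFind]
  | succ n ih =>
    rw [solutionAltOuter]
    have hg : (PySem.Dict.counter V).getD ((n : Int) + 1) 0 = (V.count ((n : Int) + 1) : Int) :=
      PySem.Dict.getD_counter V ((n : Int) + 1)
    rw [hg, Int.toNat_natCast, descBlocks, altInner_find]
    cases hinner : solutionAltInner K ((n : Int) + 1) (V.count ((n : Int) + 1)) total types with
    | inl a => rfl
    | inr p =>
      obtain ⟨t, c⟩ := p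
      dsimp only
      rw [ih]
      have hc := altInner_inr K ((n : Int) + 1) (V.count ((n : Int) + 1)) total types t c hinner
      cases hfind : solutionFind K (descBlocks V n) t c with
      | some a => rfl
      | none =>
        rw [hc]
        simp only [List.length_append, List.length_replicate]
        push_cast
        ring

theorem find_isSome (K : Int) (l : List Int) (total types : Int)
    (hne : l ≠ []) (hsum : K ≤ total + l.sum) :
    ∃ a, solutionFind K l total types = some a := by
  induction l generalizing total types with
  | nil => exact absurd rfl hne
  | cons v rest ih =>
    rw [solutionFind]
    split_ifs with h
    · exact ⟨_, rfl⟩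
    · rcases rest with _ | ⟨w, rest2⟩
      · simp at hsum
        omega
      · apply ih
        · simp
        · simp only [List.sum_cons] at hsum ⊢
          omega

theorem values_counter (xs : List Int) :
    (PySem.Dict.counter xs).values = (PySem.Set.ofList xs).map (fun k => (xs.count k : Int)) := by
  have h := PySem.Dict.items_counter (xs := xs)
  show (PySem.Dict.counter xs).items.map Prod.snd = _
  rw [h, List.map_map]
  rfl

theorem values_counter_sum (xs : List Int) :
    (PySem.Dict.counter xs).values.sum = (xs.length : Int) := by
  rw [values_counter]
  have hperm : (PySem.Set.ofList xs).Perm xs.dedup := by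
    rw [List.perm_ext_iff_of_nodup (PySem.Set.nodup_ofList xs) (List.nodup_dedup xs)]
    intro a
    rw [PySem.Set.mem_ofList, List.mem_dedup]
  have hmap := hperm.map (fun k => (xs.count k : Int))
  rw [hmap.sum_eq]
  have h2 : (xs.dedup.map fun k => (xs.count k : Int)) =
      ((xs.dedup.map fun k => xs.count k).map (Nat.cast : Nat → Int)) := by
    rw [List.map_map]
    rfl
  rw [h2, ← Nat.cast_list_sum, List.sum_map_count_dedup_eq_length]

-- ===== VERDICT (by name: the statement is the Claim_ definition above) =====
theorem solution_spec : Claim_equal_solution := by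
  intro K xs _ hpre
  obtain ⟨hne, hK⟩ := hpre
  unfold Spec_solution
  simp only [solution, solution_alt]
  have hstep : xs.foldl
      (fun (d : PySem.Dict Int Int) i => if d.contains i then d.insert i (d.getD i 0 + 1) else d.insert i 1)
      PySem.Dict.empty
      = xs.foldl (fun d i => d.insert i (d.getD i 0 + 1)) PySem.Dict.empty := by
    apply PySem.List.foldl_congr_mem
    intro d i _
    by_cases h : d.contains i
    · rw [if_pos h]
    · rw [if_neg h, PySem.Dict.getD_of_not_contains d 0 (eq_false_of_ne_true h)]
      norm_num
  rw [hstep, PySem.Dict.foldl_insert_getD_add_one_eq_counter,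
    PySem.List.foldl_append_singleton_eq_self, List.nil_append]
  set V := (PySem.Dict.counter xs).values with hV
  rw [PySem.List.foldl_prod_mk
    (f := fun (d : PySem.Dict Int Int) v => d.insert v (d.getD v 0 + 1))
    (g := fun (m : Int) v => if v > m then v else m)]
  dsimp only
  rw [PySem.Dict.foldl_insert_getD_add_one_eq_counter]
  set M := V.foldl (fun m v => if v > m then v else m) 0 with hM
  have hMmax : M = V.foldl (fun m v => max m v) 0 := by
    apply PySem.List.foldl_congr_mem
    intro m v _
    rw [max_def]
    split_ifs <;> omega
  have hmax := PySem.List.le_foldl_max_int V (fun v => v) 0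
  have hM0 : 0 ≤ M := by rw [hMmax]; exact hmax.1
  have hub : ∀ v ∈ V, v ≤ M := by
    intro v hv
    rw [hMmax]
    exact hmax.2 v hv
  have hpos : ∀ v ∈ V, 1 ≤ v := by
    intro v hv
    rw [hV, values_counter] at hv
    obtain ⟨k, hk, rfl⟩ := List.mem_map.1 hv
    have hkx : k ∈ xs := (PySem.Set.mem_ofList _ _).1 hk
    exact_mod_cast List.count_pos_iff.2 hkx
  have hbounds : ∀ v ∈ V, 1 ≤ v ∧ v ≤ ((M.toNat : Nat) : Int) := by
    intro v hv
    rw [Int.toNat_of_nonneg hM0]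
    exact ⟨hpos v hv, hub v hv⟩
  have hsorted : PySem.List.sorted V (fun x => x) true = descBlocks V M.toNat :=
    descBlocks_eq_sorted V M.toNat hbounds
  have hVsum : V.sum = (xs.length : Int) := values_counter_sum xs
  have hVne : V ≠ [] := by
    rcases xs with _ | ⟨x, xs2⟩
    · exact absurd rfl hne
    · intro hVnil
      have : ((x :: xs2).length : Int) = 0 := by rw [← hVsum, hVnil, List.sum_nil]
      simp only [List.length_cons] at this
      omega
  have hSne : PySem.List.sorted V (fun x => x) true ≠ [] := by
    intro h
    exact hVne ((PySem.List.sorted_eq_nil_iff V (fun x => x) true).1 h)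
  have hSsum : (PySem.List.sorted V (fun x => x) true).sum = V.sum :=
    (PySem.List.sorted_perm V (fun x => x) true).sum_eq
  obtain ⟨a, ha⟩ := find_isSome K (PySem.List.sorted V (fun x => x) true) 0 0 hSne
    (by rw [hSsum, hVsum]; omega)
  rw [altOuter_find, ← hsorted, ha]
  simp
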